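-- pv_equiv track=rewrite | github.com/GoGoCrisp/Chinese-Latinization-NLP | 1.Tokenization/analyze_overlap_abcd.py | _tone_numbers_to_marks
-- ===== SOURCE A (Python) =====
-- def _tone_numbers_to_marks(pinyin: str) -> str:
--     """将数字声调转换为声调符号"""
--     tone_marks = {
--         'a': {'1': 'ā', '2': 'á', '3': 'ǎ', '4': 'à'},
--         'e': {'1': 'ē', '2': 'é', '3': 'ě', '4': 'è'},
--         'i': {'1': 'ī', '2': 'í', '3': 'ǐ', '4': 'ì'},
--         'o': {'1': 'ō', '2': 'ó', '3': 'ǒ', '4': 'ò'},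
--         'u': {'1': 'ū', '2': 'ú', '3': 'ǔ', '4': 'ù'},
--         'ü': {'1': 'ǖ', '2': 'ǘ', '3': 'ǚ', '4': 'ǜ'},
--         'v': {'1': 'ǖ', '2': 'ǘ', '3': 'ǚ', '4': 'ǜ'},
--     }
--
--     # 提取末尾的数字（1-4表示第几声，5表示轻声）
--     tone_num = ''
--     if pinyin and pinyin[-1].isdigit():
--         tone_num = pinyin[-1]
--         pinyin_base = pinyin[:-1]
--     else:
--         return pinyin
--
--     # 轻声直接返回
--     if tone_num in ['0', '5']:
--         return pinyin_base
--
--     result = []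
--     matched = False
--
--     for char in pinyin_base:
--         if not matched and char in 'ae':
--             result.append(tone_marks.get(char, {}).get(tone_num, char))
--             matched = True
--         else:
--             result.append(char)
--
--     # 如果a/e没有匹配，处理其他元音
--     if not matched:
--         for i in range(len(result) - 1, -1, -1):
--             char = result[i]
--             if char in 'iouüv':
--                 result[i] = tone_marks.get(char if char != 'v' else 'ü', {}).get(tone_num, char)
--                 break
--
--     return "".join(result)
-- ===== SOURCE B (Python) =====
-- _MARKS = "āáǎàēéěèīíǐìōóǒòūúǔùǖǘǚǜ"
--
-- def _tone_numbers_to_marks(pinyin: str) -> str: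
--     """将数字声调转换为声调符号 — single-pass tracker + arithmetic table lookup"""
--     if not pinyin or not pinyin[-1].isdigit():
--         return pinyin
--     base, tone = pinyin[:-1], pinyin[-1]
--     if tone not in '1234':
--         return base
--     first_ae = -1
--     last_other = -1
--     for i, c in enumerate(base):
--         if c in 'ae':
--             first_ae = i
--             break
--         if c in 'iouüv':
--             last_other = i
--     idx = first_ae if first_ae >= 0 else last_other
--     if idx < 0:
--         return base
--     key = 'ü' if base[idx] == 'v' else base[idx]
--     marked = _MARKS[4 * "aeiouü".index(key) + int(tone) - 1]
--     return base[:idx] + marked + base[idx + 1:]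
-- ===== Notes on version B (the rewrite author's own statement) =====
-- stated objective: simpler
-- what changed: A builds the result with two loops (a flag-driven forward copy of every character plus a backward in-place fix-up over the built list, with a nested per-vowel dict-of-dicts); B makes ONE forward pass with an early break that only tracks two indices (first a/e, last other vowel), picks the marked character from a single flat marks string by the arithmetic index 4*vowel_row + tone-1, and splices it into the base string.
import Mathlib
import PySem

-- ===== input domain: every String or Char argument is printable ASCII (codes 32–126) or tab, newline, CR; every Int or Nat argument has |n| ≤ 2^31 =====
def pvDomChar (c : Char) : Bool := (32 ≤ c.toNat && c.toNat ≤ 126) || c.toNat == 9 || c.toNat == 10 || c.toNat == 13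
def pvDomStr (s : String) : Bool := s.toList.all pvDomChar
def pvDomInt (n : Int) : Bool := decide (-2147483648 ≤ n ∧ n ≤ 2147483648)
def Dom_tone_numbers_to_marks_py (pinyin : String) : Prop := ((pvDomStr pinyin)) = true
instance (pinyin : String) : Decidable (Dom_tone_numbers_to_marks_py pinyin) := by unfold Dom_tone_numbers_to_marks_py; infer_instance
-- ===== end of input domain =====

-- B replaces A's two result-building loops (flag-driven forward copy + backward fix-up over
-- the built list, nested dict table) by one forward index-tracking pass with an early break,
-- an arithmetic lookup in a flat marks string, and a splice; objective: simpler.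

-- ===== PORT A =====

-- the nested dict literal tone_marks: row lookup (outer dict, default {})
def pvRowA (c : Char) : List (Char × Char) :=
  if c = 'a' then [('1','ā'),('2','á'),('3','ǎ'),('4','à')]
  else if c = 'e' then [('1','ē'),('2','é'),('3','ě'),('4','è')]
  else if c = 'i' then [('1','ī'),('2','í'),('3','ǐ'),('4','ì')]
  else if c = 'o' then [('1','ō'),('2','ó'),('3','ǒ'),('4','ò')]
  else if c = 'u' then [('1','ū'),('2','ú'),('3','ǔ'),('4','ù')]
  else if c = 'ü' then [('1','ǖ'),('2','ǘ'),('3','ǚ'),('4','ǜ')]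
  else if c = 'v' then [('1','ǖ'),('2','ǘ'),('3','ǚ'),('4','ǜ')]
  else []

-- tone_marks.get(key, {}).get(t, dflt)
def pvGetA (key t dflt : Char) : Char := ((pvRowA key).lookup t).getD dflt

-- the 'for char in pinyin_base' loop with its matched flag
def pvForwardA : List Char → Bool → Char → List Char × Bool
  | [], m, _ => ([], m)
  | c :: rest, m, t =>
    if !m && (c == 'a' || c == 'e') then
      let p := pvForwardA rest true t
      (pvGetA c t c :: p.1, p.2)
    else
      let p := pvForwardA rest m t
      (c :: p.1, p.2)

-- the backward index loop with break, as a scan of the reversed list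
def pvBackA : List Char → Char → List Char
  | [], _ => []
  | c :: rest, t =>
    if c == 'i' || c == 'o' || c == 'u' || c == 'ü' || c == 'v' then
      pvGetA (if c == 'v' then 'ü' else c) t c :: rest
    else c :: pvBackA rest t

def tone_numbers_to_marks_py (pinyin : String) : String :=
  match pinyin.toList.getLast? with
  | none => pinyin
  | some last =>
    if last.isDigit then
      let tone := last
      let base := pinyin.toList.dropLast
      if tone == '0' || tone == '5' then String.ofList base
      else
        let p := pvForwardA base false tone
        if p.2 then String.ofList p.1
        else String.ofList ((pvBackA p.1.reverse tone).reverse)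
    else pinyin

-- ===== PORT B =====

-- _MARKS, the flat marks string
def pvMarksB : List Char := "āáǎàēéěèīíǐìōóǒòūúǔùǖǘǚǜ".toList

-- the single 'for i, c in enumerate(base)' loop with its break, carrying (first_ae, last_other)
def pvScanB : List Char → Nat → Int × Int → Int × Int
  | [], _, st => st
  | c :: rest, i, st =>
    if c == 'a' || c == 'e' then ((i : Int), st.2)
    else if c == 'i' || c == 'o' || c == 'u' || c == 'ü' || c == 'v' then
      pvScanB rest (i + 1) (st.1, (i : Int))
    else pvScanB rest (i + 1) st

def tone_numbers_to_marks_py_alt (pinyin : String) : String :=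
  match pinyin.toList.getLast? with
  | none => pinyin
  | some tone =>
    if !tone.isDigit then pinyin
    else
      let base := pinyin.toList.dropLast
      if !(tone == '1' || tone == '2' || tone == '3' || tone == '4') then String.ofList base
      else
        let st := pvScanB base 0 (-1, -1)
        let idx : Int := if st.1 ≥ 0 then st.1 else st.2
        if idx < 0 then String.ofList base
        else
          let i := idx.toNat
          let c := base.getD i ' '
          let key := if c == 'v' then 'ü' else c
          let m := pvMarksB.getD (4 * ("aeiouü".toList.idxOf key) + (tone.toNat - '1'.toNat)) ' '
          String.ofList (base.take i ++ m :: base.drop (i + 1))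

-- ===== CLAIM (what is proved, stated in full; the proofs are below) =====
def Spec_tone_numbers_to_marks_py (pinyin : String) (out : String) : Prop := out = tone_numbers_to_marks_py_alt pinyin
instance (pinyin : String) (out : String) : Decidable (Spec_tone_numbers_to_marks_py pinyin out) := by unfold Spec_tone_numbers_to_marks_py; infer_instance

def Claim_equal_tone_numbers_to_marks_py : Prop := ∀ (pinyin : String), Dom_tone_numbers_to_marks_py pinyin → Spec_tone_numbers_to_marks_py pinyin (tone_numbers_to_marks_py pinyin)

-- ===== LEMMAS AND PROOFS =====

theorem pv_fwd_true (l : List Char) (t : Char) : pvForwardA l true t = (l, true) := by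
  induction l with
  | nil => rfl
  | cons c rest ih => simp [pvForwardA, ih]

theorem pv_fwd_none (l : List Char) (t : Char)
    (h : l.findIdx? (fun c => c == 'a' || c == 'e') = none) :
    pvForwardA l false t = (l, false) := by
  induction l with
  | nil => rfl
  | cons c rest ih =>
    rw [List.findIdx?_cons] at h
    by_cases hc : (c == 'a' || c == 'e') = true
    · rw [if_pos hc] at h; exact absurd h (by simp)
    · rw [if_neg hc, Option.map_eq_none_iff] at h
      simp [pvForwardA, hc, ih h]

theorem pv_fwd_some (l : List Char) (t : Char) (i : Nat)
    (h : l.findIdx? (fun c => c == 'a' || c == 'e') = some i) :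
    ((l.getD i ' ' == 'a' || l.getD i ' ' == 'e') = true) ∧
    pvForwardA l false t =
      (l.take i ++ pvGetA (l.getD i ' ') t (l.getD i ' ') :: l.drop (i+1), true) := by
  induction l generalizing i with
  | nil =>
    obtain ⟨hlt, -⟩ := List.findIdx?_eq_some_iff_findIdx_eq.1 h
    simp at hlt
  | cons c rest ih =>
    rw [List.findIdx?_cons] at h
    by_cases hc : (c == 'a' || c == 'e') = true
    · rw [if_pos hc] at h
      obtain rfl := Option.some.inj h
      simp [pvForwardA, hc, pv_fwd_true]
    · rw [if_neg hc, Option.map_eq_some_iff] at h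
      obtain ⟨i', hi', rfl⟩ := h
      obtain ⟨h1, h2⟩ := ih i' hi'
      refine ⟨by simpa using h1, ?_⟩
      simp [pvForwardA, hc, h2]

theorem pv_back_none (m : List Char) (t : Char)
    (h : m.findIdx? (fun c => c == 'i' || c == 'o' || c == 'u' || c == 'ü' || c == 'v') = none) :
    pvBackA m t = m := by
  induction m with
  | nil => rfl
  | cons c rest ih =>
    rw [List.findIdx?_cons] at h
    by_cases hc : (c == 'i' || c == 'o' || c == 'u' || c == 'ü' || c == 'v') = true
    · rw [if_pos hc] at h; exact absurd h (by simp)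
    · rw [if_neg hc, Option.map_eq_none_iff] at h
      simp [pvBackA, hc, ih h]

theorem pv_back_some (m : List Char) (t : Char) (j : Nat)
    (h : m.findIdx? (fun c => c == 'i' || c == 'o' || c == 'u' || c == 'ü' || c == 'v') = some j) :
    ((m.getD j ' ' == 'i' || m.getD j ' ' == 'o' || m.getD j ' ' == 'u' ||
      m.getD j ' ' == 'ü' || m.getD j ' ' == 'v') = true) ∧ j < m.length ∧
    pvBackA m t =
      m.take j ++ pvGetA (if m.getD j ' ' == 'v' then 'ü' else m.getD j ' ') t (m.getD j ' ')
        :: m.drop (j+1) := by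
  induction m generalizing j with
  | nil =>
    obtain ⟨hlt, -⟩ := List.findIdx?_eq_some_iff_findIdx_eq.1 h
    simp at hlt
  | cons c rest ih =>
    rw [List.findIdx?_cons] at h
    by_cases hc : (c == 'i' || c == 'o' || c == 'u' || c == 'ü' || c == 'v') = true
    · rw [if_pos hc] at h
      obtain rfl := Option.some.inj h
      simp [pvBackA, hc]
    · rw [if_neg hc, Option.map_eq_some_iff] at h
      obtain ⟨j', hj', rfl⟩ := h
      obtain ⟨h1, hlen, h2⟩ := ih j' hj'
      refine ⟨by simpa using h1, by simpa using hlen, ?_⟩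
      simp [pvBackA, hc, h2]

theorem pv_get_default (k t d : Char)
    (h : (t == '1' || t == '2' || t == '3' || t == '4') = false) :
    pvGetA k t d = d := by
  simp only [Bool.or_eq_false_iff] at h
  obtain ⟨⟨⟨h1, h2⟩, h3⟩, h4⟩ := h
  unfold pvGetA pvRowA
  split_ifs <;> simp [List.lookup, h1, h2, h3, h4]

theorem pv_fwd_default (l : List Char) (b : Bool) (t : Char)
    (h : ∀ k d, pvGetA k t d = d) : (pvForwardA l b t).1 = l := by
  induction l generalizing b with
  | nil => rfl
  | cons c rest ih =>
    by_cases hc : (!b && (c == 'a' || c == 'e')) = true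
    · simp [pvForwardA, hc, h, ih]
    · simp [pvForwardA, hc, ih]

theorem pv_back_default (m : List Char) (t : Char)
    (h : ∀ k d, pvGetA k t d = d) : pvBackA m t = m := by
  induction m with
  | nil => rfl
  | cons c rest ih =>
    by_cases hc : (c == 'i' || c == 'o' || c == 'u' || c == 'ü' || c == 'v') = true
    · simp [pvBackA, hc, h]
    · simp [pvBackA, hc, ih]

-- B's scan when the loop breaks at the first a/e
theorem pv_scan_some (l : List Char) (i : Nat)
    (h : l.findIdx? (fun c => c == 'a' || c == 'e') = some i) (k : Nat) (lo : Int) :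
    ∃ lo', pvScanB l k (-1, lo) = (((k + i : Nat) : Int), lo') := by
  induction l generalizing i k lo with
  | nil =>
    obtain ⟨hlt, -⟩ := List.findIdx?_eq_some_iff_findIdx_eq.1 h
    simp at hlt
  | cons c rest ih =>
    rw [List.findIdx?_cons] at h
    by_cases hc : (c == 'a' || c == 'e') = true
    · rw [if_pos hc] at h
      obtain rfl := Option.some.inj h
      exact ⟨lo, by simp [pvScanB, hc]⟩
    · rw [if_neg hc, Option.map_eq_some_iff] at h
      obtain ⟨i', hi', rfl⟩ := h
      by_cases ho : (c == 'i' || c == 'o' || c == 'u' || c == 'ü' || c == 'v') = true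
      · obtain ⟨lo', hl⟩ := ih i' hi' (k + 1) (k : Int)
        refine ⟨lo', ?_⟩
        rw [show ((k + (i' + 1) : Nat) : Int) = ((k + 1 + i' : Nat) : Int) by push_cast; ring]
        simpa [pvScanB, hc, ho] using hl
      · obtain ⟨lo', hl⟩ := ih i' hi' (k + 1) lo
        refine ⟨lo', ?_⟩
        rw [show ((k + (i' + 1) : Nat) : Int) = ((k + 1 + i' : Nat) : Int) by push_cast; ring]
        simpa [pvScanB, hc, ho] using hl

-- B's scan when no a/e occurs: first_ae stays -1, last_other is the last index of i/o/u/ü/v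
theorem pv_scan_none (l : List Char)
    (h : l.findIdx? (fun c => c == 'a' || c == 'e') = none) (k : Nat) (lo : Int) :
    pvScanB l k (-1, lo) = (-1,
      match l.reverse.findIdx? (fun c => c == 'i' || c == 'o' || c == 'u' || c == 'ü' || c == 'v') with
      | some j => (((k + (l.length - 1 - j) : Nat) : Int))
      | none => lo) := by
  induction l generalizing k lo with
  | nil => rfl
  | cons c rest ih =>
    rw [List.findIdx?_cons] at h
    by_cases hc : (c == 'a' || c == 'e') = true
    · rw [if_pos hc] at h; exact absurd h (by simp)
    rw [if_neg hc, Option.map_eq_none_iff] at h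
    have hrev : (c :: rest).reverse = rest.reverse ++ [c] := by simp
    by_cases ho : (c == 'i' || c == 'o' || c == 'u' || c == 'ü' || c == 'v') = true
    · have hl : pvScanB (c :: rest) k (-1, lo) = pvScanB rest (k + 1) (-1, (k : Int)) := by
        simp [pvScanB, hc, ho]
      rw [hl, ih h (k + 1) (k : Int), hrev, List.findIdx?_append]
      cases hr : rest.reverse.findIdx? (fun c => c == 'i' || c == 'o' || c == 'u' || c == 'ü' || c == 'v') with
      | some j =>
        obtain ⟨hlt, -⟩ := List.findIdx?_eq_some_iff_findIdx_eq.1 hr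
        have hj : j < rest.length := by simpa using hlt
        rw [Option.some_or, Prod.mk.injEq]
        refine ⟨rfl, ?_⟩
        simp only [List.length_cons]
        rw [Nat.cast_inj]
        omega
      | none =>
        simp only [Option.none_or, List.findIdx?_cons, ho, if_true, List.findIdx?_nil,
          Option.map_some, Option.map_none, List.length_reverse]
        rw [Prod.mk.injEq]
        refine ⟨rfl, ?_⟩
        simp only [List.length_cons]
        rw [Nat.cast_inj]
        omega
    · have hl : pvScanB (c :: rest) k (-1, lo) = pvScanB rest (k + 1) (-1, lo) := by
        simp [pvScanB, hc, ho]
      rw [hl, ih h (k + 1) lo, hrev, List.findIdx?_append]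
      cases hr : rest.reverse.findIdx? (fun c => c == 'i' || c == 'o' || c == 'u' || c == 'ü' || c == 'v') with
      | some j =>
        obtain ⟨hlt, -⟩ := List.findIdx?_eq_some_iff_findIdx_eq.1 hr
        have hj : j < rest.length := by simpa using hlt
        rw [Option.some_or, Prod.mk.injEq]
        refine ⟨rfl, ?_⟩
        simp only [List.length_cons]
        rw [Nat.cast_inj]
        omega
      | none =>
        simp [List.findIdx?_cons, ho, Option.or]

theorem pv_mark_ae (c t : Char)
    (hc : (c == 'a' || c == 'e') = true)
    (ht : (t == '1' || t == '2' || t == '3' || t == '4') = true) :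
    pvGetA c t c = pvMarksB.getD (4 * ("aeiouü".toList.idxOf c) + (t.toNat - '1'.toNat)) ' ' := by
  simp only [Bool.or_eq_true, beq_iff_eq] at hc ht
  rcases hc with rfl | rfl <;> rcases ht with ((rfl | rfl) | rfl) | rfl <;> decide

theorem pv_mark_v (c t : Char)
    (hc : (c == 'i' || c == 'o' || c == 'u' || c == 'ü' || c == 'v') = true)
    (ht : (t == '1' || t == '2' || t == '3' || t == '4') = true) :
    pvGetA (if c == 'v' then 'ü' else c) t c =
      pvMarksB.getD (4 * ("aeiouü".toList.idxOf (if c == 'v' then 'ü' else c)) + (t.toNat - '1'.toNat)) ' ' := by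
  simp only [Bool.or_eq_true, beq_iff_eq] at hc ht
  rcases hc with (((rfl | rfl) | rfl) | rfl) | rfl <;> rcases ht with ((rfl | rfl) | rfl) | rfl <;> decide

theorem pv_main (pinyin : String) :
    tone_numbers_to_marks_py pinyin = tone_numbers_to_marks_py_alt pinyin := by
  unfold tone_numbers_to_marks_py tone_numbers_to_marks_py_alt
  cases hL : pinyin.toList.getLast? with
  | none => rfl
  | some t =>
    by_cases hd : t.isDigit
    · simp only [hd, if_true, Bool.not_true, Bool.false_eq_true, if_false]
      by_cases h14 : (t == '1' || t == '2' || t == '3' || t == '4') = true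
      · have h05 : (t == '0' || t == '5') = false := by
          simp only [Bool.or_eq_true, beq_iff_eq] at h14
          rcases h14 with ((rfl | rfl) | rfl) | rfl <;> decide
        simp only [h05, Bool.false_eq_true, if_false, h14, Bool.not_true, if_false]
        cases hf : (pinyin.toList.dropLast).findIdx? (fun c => c == 'a' || c == 'e') with
        | some i =>
          obtain ⟨hc, h2⟩ := pv_fwd_some (pinyin.toList.dropLast) t i hf
          obtain ⟨lo', hs⟩ := pv_scan_some (pinyin.toList.dropLast) i hf 0 (-1)
          have hv : ¬ ((pinyin.toList.dropLast)[i]?.getD ' ') = 'v' := by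
            simp only [List.getD_eq_getElem?_getD, Bool.or_eq_true, beq_iff_eq] at hc
            rcases hc with h | h <;> simp [h]
          have hm := pv_mark_ae ((pinyin.toList.dropLast).getD i ' ') t hc h14
          simp only [List.getD_eq_getElem?_getD] at hm
          rw [h2, hs]
          have hge : ((0 + i : Nat) : Int) ≥ 0 := by omega
          simp only [hge, if_true]
          have hnlt : ¬ (((0 + i : Nat) : Int) < 0) := by omega
          simp only [hnlt, if_false]
          simp [hv, hm]
        | none =>
          rw [pv_fwd_none _ t hf, pv_scan_none _ hf 0 (-1)]
          simp only
          cases hb : (pinyin.toList.dropLast).reverse.findIdx?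
              (fun c => c == 'i' || c == 'o' || c == 'u' || c == 'ü' || c == 'v') with
          | none =>
            rw [pv_back_none _ t hb]
            simp
          | some j =>
            obtain ⟨hc, hj, h2⟩ := pv_back_some _ t j hb
            rw [h2]
            have hn : j < (pinyin.toList.dropLast).length := by simpa using hj
            have hget : (pinyin.toList.dropLast).reverse.getD j ' ' =
                (pinyin.toList.dropLast).getD ((pinyin.toList.dropLast).length - 1 - j) ' ' := by
              rw [List.getD_eq_getElem?_getD, List.getD_eq_getElem?_getD,
                List.getElem?_eq_getElem (by simpa using hj),
                List.getElem?_eq_getElem (by omega), List.getElem_reverse]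
            rw [hget] at hc h2 ⊢
            have hrevtake : ((pinyin.toList.dropLast).reverse.take j).reverse =
                (pinyin.toList.dropLast).drop ((pinyin.toList.dropLast).length - 1 - j + 1) := by
              rw [List.take_reverse, List.reverse_reverse]
              congr 1
              omega
            have hrevdrop : ((pinyin.toList.dropLast).reverse.drop (j+1)).reverse =
                (pinyin.toList.dropLast).take ((pinyin.toList.dropLast).length - 1 - j) := by
              rw [List.drop_reverse, List.reverse_reverse]
              congr 1
              omega
            have hm := pv_mark_v ((pinyin.toList.dropLast).getD
                ((pinyin.toList.dropLast).length - 1 - j) ' ') t hc h14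
            simp only [List.getD_eq_getElem?_getD] at hm
            have hn1 : ¬ ((-1 : Int) ≥ 0) := by norm_num
            have hge : (((0 + ((pinyin.toList.dropLast).length - 1 - j) : Nat) : Int)) ≥ 0 := by omega
            have hnlt : ¬ ((((0 + ((pinyin.toList.dropLast).length - 1 - j) : Nat) : Int)) < 0) := by omega
            simp only [hn1, if_false, Nat.zero_add, Int.toNat_natCast]
            simp only [List.length_dropLast, String.length_toList] at hm ⊢
            simp at hm
            simp [hrevtake, hrevdrop, List.append_assoc, hm]
      · have hdef : ∀ k d, pvGetA k t d = d := fun k d =>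
          pv_get_default k t d (by simpa using h14)
        by_cases h05 : (t == '0' || t == '5') = true
        · rw [if_pos h05]
          simp [h14]
        · simp only [h05, Bool.false_eq_true, if_false, h14]
          have hfst := pv_fwd_default (pinyin.toList.dropLast) false t hdef
          cases hp2 : (pvForwardA (pinyin.toList.dropLast) false t).2 with
          | true => simp [hfst]
          | false => simp [hfst, pv_back_default _ t hdef]
    · simp [hd]

-- ===== VERDICT (by name: the statement is the Claim_ definition above) =====
theorem tone_numbers_to_marks_py_spec : Claim_equal_tone_numbers_to_marks_py := by
  intro pinyin _
  exact pv_main pinyin
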